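-- pv_equiv track=rewrite | github.com/dhung0811/MLOps-Project | app/utils/build_graph.py | offset_to_line_col
-- ===== SOURCE A (Python) =====
-- from typing import List, Dict, Tuple, Optional
--
-- def compute_line_offsets(code: str) -> List[int]:
--     offsets = [0]
--     for idx, ch in enumerate(code):
--         if ch == "\n":
--             offsets.append(idx + 1)
--     return offsets
--
-- def offset_to_line_col(code: str, offset: int) -> Tuple[int, int]:
--     if offset < 0:
--         return (1, 1)
--     line_offsets = compute_line_offsets(code)
--     line = 1
--     for i, start in enumerate(line_offsets, 1):
--         if start <= offset:
--             line = i
--         else: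
--             break
--     col = offset - line_offsets[line - 1] + 1
--     return (line, col)
-- ===== SOURCE B (Python) =====
-- def offset_to_line_col(code: str, offset: int):
--     # One fused pass over code[:offset]: track the current line number and the
--     # start offset of the current line; no line-offset table, no second scan.
--     if offset < 0:
--         return (1, 1)
--     line, start = 1, 0
--     for i, ch in enumerate(code[:offset]):
--         if ch == "\n":
--             line, start = line + 1, i + 1
--     return (line, offset - start + 1)
-- ===== Notes on version B (the rewrite author's own statement) =====
-- stated objective: simpler
-- what changed: Replaces A's two-phase algorithm (build the full table of line-start offsets over the whole string, then scan it with a break and index back into it) by a single fused pass over code[:offset] that tracks the current line number and the current line's start offset in two scalars, with no table and no second scan.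
import Mathlib
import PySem

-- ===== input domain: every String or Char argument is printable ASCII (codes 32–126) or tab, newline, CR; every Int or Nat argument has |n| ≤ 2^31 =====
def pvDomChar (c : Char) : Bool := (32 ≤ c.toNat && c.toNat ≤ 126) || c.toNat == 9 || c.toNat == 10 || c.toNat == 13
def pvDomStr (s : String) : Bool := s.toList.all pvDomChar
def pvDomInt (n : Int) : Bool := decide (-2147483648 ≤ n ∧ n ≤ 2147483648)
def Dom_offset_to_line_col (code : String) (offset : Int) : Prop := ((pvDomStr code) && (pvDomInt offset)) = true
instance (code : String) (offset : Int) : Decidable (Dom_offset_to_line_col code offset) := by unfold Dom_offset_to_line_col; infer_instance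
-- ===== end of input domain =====

-- B replaces A's build-a-line-offset-table-then-scan-it with one fused pass over
-- code[:offset] tracking (line, line start) in two scalars; same return value, simpler.

-- ===== PORT A =====
def compute_line_offsets (code : String) : List Int :=
  (PySem.List.enumerate code.toList 0).foldl
    (fun offsets p => if p.2 = '\n' then offsets ++ [p.1 + 1] else offsets) [0]

-- the `for i, start in enumerate(line_offsets, 1)` loop with its break
def findLineLoop (pairs : List (Int × Int)) (line off : Int) : Int :=
  match pairs with
  | [] => line
  | (i, start) :: rest => if start ≤ off then findLineLoop rest i off else line

def offset_to_line_col (code : String) (offset : Int) : List Int :=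
  if offset < 0 then [1, 1]
  else
    let line_offsets := compute_line_offsets code
    let line := findLineLoop (PySem.List.enumerate line_offsets 1) 1 offset
    -- line_offsets[line - 1] is always in range (1 ≤ line ≤ len), so getD-totalisation is exact
    let col := offset - PySem.List.pyGetD line_offsets (line - 1) 0 + 1
    [line, col]

-- ===== PORT B =====
-- the `for i, ch in enumerate(code[:offset])` loop of Source B, state (line, start)
def bLoop (pairs : List (Int × Char)) (line start : Int) : Int × Int :=
  match pairs with
  | [] => (line, start)
  | (i, c) :: rest => if c = '\n' then bLoop rest (line + 1) (i + 1) else bLoop rest line start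

def offset_to_line_col_alt (code : String) (offset : Int) : List Int :=
  if offset < 0 then [1, 1]
  else
    let pre := PySem.List.slice code.toList none (some offset)
    let ls := bLoop (PySem.List.enumerate pre 0) 1 0
    [ls.1, offset - ls.2 + 1]

-- ===== PRECONDITION & SPEC =====
def Spec_offset_to_line_col (code : String) (offset : Int) (out : List Int) : Prop := out = offset_to_line_col_alt code offset
instance (code : String) (offset : Int) (out : List Int) : Decidable (Spec_offset_to_line_col code offset out) := by unfold Spec_offset_to_line_col; infer_instance

-- ===== CLAIM (what is proved, stated in full; the proofs are below) =====
def Claim_equal_offset_to_line_col : Prop := ∀ (code : String) (offset : Int), Dom_offset_to_line_col code offset → Spec_offset_to_line_col code offset (offset_to_line_col code offset)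

-- ===== LEMMAS AND PROOFS =====

-- starts (index + 1) of the lines opened by the newlines of cs, cs starting at absolute index k
def nlStarts : List Char → Int → List Int
  | [], _ => []
  | c :: t, k => if c = '\n' then (k + 1) :: nlStarts t (k + 1) else nlStarts t (k + 1)

-- how many of those starts are ≤ off
def cntLe : List Char → Int → Int → Nat
  | [], _, _ => 0
  | c :: t, k, off => (if c = '\n' ∧ k + 1 ≤ off then 1 else 0) + cntLe t (k + 1) off

-- the last such start (a = value if none)
def lastNlStart : List Char → Int → Int → Int → Int
  | [], _, _, a => a
  | c :: t, k, off, a =>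
      if c = '\n' ∧ k + 1 ≤ off then lastNlStart t (k + 1) off (k + 1) else lastNlStart t (k + 1) off a

theorem cntLe_of_le (cs : List Char) : ∀ (k off : Int), off ≤ k → cntLe cs k off = 0 := by
  induction cs with
  | nil => intro k off _; rfl
  | cons c t ih =>
      intro k off h
      have hcond : ¬ (c = '\n' ∧ k + 1 ≤ off) := by rintro ⟨-, h2⟩; omega
      show (if c = '\n' ∧ k + 1 ≤ off then 1 else 0) + cntLe t (k + 1) off = 0
      rw [if_neg hcond, ih (k + 1) off (by omega)]

theorem lastNlStart_of_le (cs : List Char) : ∀ (k off a : Int), off ≤ k → lastNlStart cs k off a = a := by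
  induction cs with
  | nil => intro k off a _; rfl
  | cons c t ih =>
      intro k off a h
      have hcond : ¬ (c = '\n' ∧ k + 1 ≤ off) := by rintro ⟨-, h2⟩; omega
      show (if c = '\n' ∧ k + 1 ≤ off then lastNlStart t (k + 1) off (k + 1)
            else lastNlStart t (k + 1) off a) = a
      rw [if_neg hcond, ih (k + 1) off a (by omega)]

theorem nlStarts_cons_nl (c : Char) (t : List Char) (k : Int) (hc : c = '\n') :
    nlStarts (c :: t) k = (k + 1) :: nlStarts t (k + 1) := by simp [nlStarts, hc]

theorem nlStarts_cons_not (c : Char) (t : List Char) (k : Int) (hc : ¬ c = '\n') :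
    nlStarts (c :: t) k = nlStarts t (k + 1) := by simp [nlStarts, hc]

theorem cntLe_cons_pos (c : Char) (t : List Char) (k off : Int) (h : c = '\n' ∧ k + 1 ≤ off) :
    cntLe (c :: t) k off = 1 + cntLe t (k + 1) off := by simp [cntLe, h]

theorem cntLe_cons_neg (c : Char) (t : List Char) (k off : Int) (h : ¬ (c = '\n' ∧ k + 1 ≤ off)) :
    cntLe (c :: t) k off = cntLe t (k + 1) off := by
  rw [show cntLe (c :: t) k off
      = (if c = '\n' ∧ k + 1 ≤ off then 1 else 0) + cntLe t (k + 1) off from rfl,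
    if_neg h, Nat.zero_add]

theorem lastNlStart_cons_pos (c : Char) (t : List Char) (k off a : Int) (h : c = '\n' ∧ k + 1 ≤ off) :
    lastNlStart (c :: t) k off a = lastNlStart t (k + 1) off (k + 1) := by simp [lastNlStart, h]

theorem lastNlStart_cons_neg (c : Char) (t : List Char) (k off a : Int) (h : ¬ (c = '\n' ∧ k + 1 ≤ off)) :
    lastNlStart (c :: t) k off a = lastNlStart t (k + 1) off a := by
  rw [show lastNlStart (c :: t) k off a
      = (if c = '\n' ∧ k + 1 ≤ off then lastNlStart t (k + 1) off (k + 1)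
         else lastNlStart t (k + 1) off a) from rfl, if_neg h]

theorem bLoop_cons (i : Int) (c : Char) (rest : List (Int × Char)) (line start : Int) :
    bLoop ((i, c) :: rest) line start
      = if c = '\n' then bLoop rest (line + 1) (i + 1) else bLoop rest line start := rfl

theorem compute_line_offsets_foldl (cs : List Char) :
    ∀ (k : Int) (acc : List Int),
      (PySem.List.enumerate cs k).foldl
        (fun offsets p => if p.2 = '\n' then offsets ++ [p.1 + 1] else offsets) acc
      = acc ++ nlStarts cs k := by
  induction cs with
  | nil => intro k acc; simp [PySem.List.enumerate_nil, nlStarts]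
  | cons c t ih =>
      intro k acc
      rw [PySem.List.enumerate_cons]
      by_cases hc : c = '\n' <;> simp [List.foldl_cons, hc, ih, nlStarts]

theorem compute_line_offsets_eq (code : String) :
    compute_line_offsets code = 0 :: nlStarts code.toList 0 := by
  unfold compute_line_offsets
  rw [compute_line_offsets_foldl]
  rfl

theorem findLineLoop_nlStarts (cs : List Char) :
    ∀ (k i l off : Int),
      findLineLoop (PySem.List.enumerate (nlStarts cs k) i) l off
        = if cntLe cs k off = 0 then l else i + (cntLe cs k off : Int) - 1 := by
  induction cs with
  | nil => intro k i l off; simp [nlStarts, cntLe, PySem.List.enumerate_nil, findLineLoop]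
  | cons c t ih =>
      intro k i l off
      by_cases hc : c = '\n'
      · by_cases hk : k + 1 ≤ off
        · have hcond : c = '\n' ∧ k + 1 ≤ off := ⟨hc, hk⟩
          rw [nlStarts_cons_nl c t k hc, cntLe_cons_pos c t k off hcond,
            PySem.List.enumerate_cons]
          show (if k + 1 ≤ off then findLineLoop (PySem.List.enumerate (nlStarts t (k + 1)) (i + 1)) i off else l)
              = _
          rw [if_pos hk, ih (k + 1) (i + 1) i off]
          by_cases h0 : cntLe t (k + 1) off = 0
          · simp [h0]
          · rw [if_neg h0, if_neg (by omega)]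
            push_cast
            omega
        · have hcond : ¬ (c = '\n' ∧ k + 1 ≤ off) := by rintro ⟨-, h2⟩; omega
          have hz : cntLe t (k + 1) off = 0 := cntLe_of_le t (k + 1) off (by omega)
          rw [nlStarts_cons_nl c t k hc, cntLe_cons_neg c t k off hcond, hz,
            PySem.List.enumerate_cons]
          show (if k + 1 ≤ off then findLineLoop (PySem.List.enumerate (nlStarts t (k + 1)) (i + 1)) i off else l)
              = _
          rw [if_neg hk, if_pos rfl]
      · have hcond : ¬ (c = '\n' ∧ k + 1 ≤ off) := by rintro ⟨h1, -⟩; exact hc h1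
        rw [nlStarts_cons_not c t k hc, cntLe_cons_neg c t k off hcond, ih (k + 1) i l off]

theorem getD_nlStarts (cs : List Char) :
    ∀ (k off a : Int),
      (a :: nlStarts cs k).getD (cntLe cs k off) 0 = lastNlStart cs k off a := by
  induction cs with
  | nil => intro k off a; simp [nlStarts, cntLe, lastNlStart]
  | cons c t ih =>
      intro k off a
      by_cases hc : c = '\n'
      · by_cases hk : k + 1 ≤ off
        · have hcond : c = '\n' ∧ k + 1 ≤ off := ⟨hc, hk⟩
          rw [nlStarts_cons_nl c t k hc, cntLe_cons_pos c t k off hcond,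
            lastNlStart_cons_pos c t k off a hcond, Nat.add_comm, List.getD_cons_succ]
          exact ih (k + 1) off (k + 1)
        · have hcond : ¬ (c = '\n' ∧ k + 1 ≤ off) := by rintro ⟨-, h2⟩; omega
          have hz : cntLe t (k + 1) off = 0 := cntLe_of_le t (k + 1) off (by omega)
          have hl : lastNlStart t (k + 1) off a = a := lastNlStart_of_le t (k + 1) off a (by omega)
          rw [nlStarts_cons_nl c t k hc, cntLe_cons_neg c t k off hcond,
            lastNlStart_cons_neg c t k off a hcond, hz, hl, List.getD_cons_zero]
      · have hcond : ¬ (c = '\n' ∧ k + 1 ≤ off) := by rintro ⟨h1, -⟩; exact hc h1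
        rw [nlStarts_cons_not c t k hc, cntLe_cons_neg c t k off hcond,
          lastNlStart_cons_neg c t k off a hcond]
        exact ih (k + 1) off a

theorem bLoop_take (cs : List Char) :
    ∀ (k off line a : Int),
      bLoop (PySem.List.enumerate (cs.take (off - k).toNat) k) line a
        = (line + (cntLe cs k off : Int), lastNlStart cs k off a) := by
  induction cs with
  | nil =>
      intro k off line a
      simp [PySem.List.enumerate_nil, bLoop, cntLe, lastNlStart]
  | cons c t ih =>
      intro k off line a
      by_cases hko : off - k ≤ 0
      · have h0 : (off - k).toNat = 0 := by omega
        have hz : cntLe (c :: t) k off = 0 := cntLe_of_le (c :: t) k off (by omega)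
        have hl : lastNlStart (c :: t) k off a = a := lastNlStart_of_le (c :: t) k off a (by omega)
        simp [h0, PySem.List.enumerate_nil, bLoop, hz, hl]
      · have htake : (off - k).toNat = (off - (k + 1)).toNat + 1 := by omega
        rw [htake]
        simp only [List.take_succ_cons, PySem.List.enumerate_cons]
        by_cases hc : c = '\n'
        · have hcond : c = '\n' ∧ k + 1 ≤ off := ⟨hc, by omega⟩
          rw [bLoop_cons, if_pos hc]
          rw [ih (k + 1) off (line + 1) (k + 1), cntLe_cons_pos c t k off hcond,
            lastNlStart_cons_pos c t k off a hcond]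
          simp only [Prod.mk.injEq]
          refine ⟨by push_cast; ring, trivial⟩
        · have hcond : ¬ (c = '\n' ∧ k + 1 ≤ off) := by rintro ⟨h1, -⟩; exact hc h1
          rw [bLoop_cons, if_neg hc]
          rw [ih (k + 1) off line a, cntLe_cons_neg c t k off hcond,
            lastNlStart_cons_neg c t k off a hcond]

-- ===== VERDICT (by name: the statement is the Claim_ definition above) =====
theorem offset_to_line_col_spec : Claim_equal_offset_to_line_col := by
  intro code offset _
  unfold Spec_offset_to_line_col offset_to_line_col offset_to_line_col_alt
  by_cases hneg : offset < 0
  · simp [hneg]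
  · have h0 : (0 : Int) ≤ offset := by omega
    simp only [hneg, if_false]
    rw [compute_line_offsets_eq, PySem.List.slice_to code.toList h0]
    have htoNat : offset.toNat = (offset - 0).toNat := by omega
    rw [htoNat, bLoop_take code.toList 0 offset 1 0]
    set cs := code.toList with hcs
    set m := cntLe cs 0 offset with hm
    have hline :
        findLineLoop (PySem.List.enumerate (0 :: nlStarts cs 0) 1) 1 offset = 1 + (m : Int) := by
      rw [PySem.List.enumerate_cons]
      show (if (0 : Int) ≤ offset then
          findLineLoop (PySem.List.enumerate (nlStarts cs 0) (1 + 1)) 1 offset else 1) = _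
      rw [if_pos h0, findLineLoop_nlStarts cs 0 (1 + 1) 1 offset, ← hm]
      by_cases hz : m = 0
      · rw [if_pos hz, hz]; norm_num
      · rw [if_neg hz]; push_cast; omega
    rw [hline]
    have hidx : PySem.List.pyGetD (0 :: nlStarts cs 0) (1 + (m : Int) - 1) 0
        = lastNlStart cs 0 offset 0 := by
      have h1 : (1 : Int) + (m : Int) - 1 = ((m : Nat) : Int) := by omega
      rw [h1, PySem.List.pyGetD_natCast, hm]
      exact getD_nlStarts cs 0 offset 0
    rw [hidx]
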